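-- pv_equiv track=rewrite | github.com/shevcodn/python-dsa | phase_05_data_structures/p350_BOSS.py | count_and_max
-- ===== SOURCE A (Python) =====
-- def count_and_max(grid):
--     rows, cols = len(grid), len(grid[0])
--     visited = set()
--     count = 0
--     max_size = 0
--
--     def dfs(r, c):
--         if r < 0 or r >= rows or c < 0 or c >= cols:
--             return 0
--         if grid[r][c] == 0 or (r, c) in visited:
--             return 0
--         visited.add((r, c))
--         return 1 + dfs(r+1,c) + dfs(r-1,c) + dfs(r,c+1) + dfs(r,c-1)
--
--     for r in range(rows):
--         for c in range(cols):
--             if grid[r][c] == 1 and (r, c) not in visited: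
--                 size = dfs(r, c)
--                 count += 1
--                 max_size = max(max_size, size)
--
--     return count, max_size
-- ===== SOURCE B (Python) =====
-- def count_and_max(grid):
--     rows, cols = len(grid), len(grid[0])
--     visited = set()
--     count = 0
--     max_size = 0
--     for r in range(rows):
--         for c in range(cols):
--             if grid[r][c] == 1 and (r, c) not in visited:
--                 size = 0
--                 stack = [(r, c)]
--                 while stack:
--                     x, y = stack.pop()
--                     if x < 0 or x >= rows or y < 0 or y >= cols:
--                         continue
--                     if grid[x][y] == 0 or (x, y) in visited:
--                         continue
--                     visited.add((x, y))
--                     size += 1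
--                     stack.extend(((x, y - 1), (x, y + 1), (x - 1, y), (x + 1, y)))
--                 count += 1
--                 max_size = max(max_size, size)
--     return count, max_size
-- ===== Notes on version B (the rewrite author's own statement) =====
-- stated objective: alternative
-- what changed: replaces the recursive DFS (a nested function threading a visited set through four self-calls) by an iterative flood fill with an explicit worklist stack and an in-loop size counter, so no recursion is used at all
import Mathlib
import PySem

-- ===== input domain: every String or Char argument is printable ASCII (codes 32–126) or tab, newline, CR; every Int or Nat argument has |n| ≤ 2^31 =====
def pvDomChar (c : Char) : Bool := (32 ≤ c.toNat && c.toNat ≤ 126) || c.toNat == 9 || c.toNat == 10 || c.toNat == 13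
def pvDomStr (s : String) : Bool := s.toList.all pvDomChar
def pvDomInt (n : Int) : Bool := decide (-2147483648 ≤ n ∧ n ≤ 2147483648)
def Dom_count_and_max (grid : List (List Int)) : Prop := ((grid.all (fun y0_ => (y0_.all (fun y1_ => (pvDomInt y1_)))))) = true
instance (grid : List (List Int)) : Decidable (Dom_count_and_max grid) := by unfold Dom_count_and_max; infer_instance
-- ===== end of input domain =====

-- B replaces A's recursive DFS by an iterative flood fill with an explicit stack; return values proved equal on all
-- non-raising inputs (non-empty grids whose rows all have at least len(grid[0]) entries).

-- shared helper: grid[r][c]; every access in both programs is guarded by 0 ≤ r < rows, 0 ≤ c ≤ cols ≤ len(grid[r]),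
-- so under Pre_ the defaults are never used
def pvCell (grid : List (List Int)) (r c : Int) : Int :=
  PySem.List.pyGetD (PySem.List.pyGetD grid r []) c 0

-- all in-bounds cells (proof/termination helper; also bounds the recursion depth of A's dfs)
def pvCells (rows cols : Int) : List (Int × Int) :=
  (PySem.List.pyRange 0 rows 1).flatMap (fun r => (PySem.List.pyRange 0 cols 1).map (fun c => (r, c)))

-- number of in-bounds cells not yet visited (termination measure of B's while loop)
def pvFree (rows cols : Int) (v : PySem.Set (Int × Int)) : Nat :=
  ((pvCells rows cols).filter (fun p => !(p ∈ v))).length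

lemma pvFilter_lt {a : Type} (l : List a) (p q : a → Bool) (h : ∀ x, q x = true → p x = true)
    (x : a) (hx : x ∈ l) (hpx : p x = true) (hqx : q x = false) :
    (l.filter q).length < (l.filter p).length := by
  induction l with
  | nil => cases hx
  | cons a t ih =>
    have hle : ∀ (t : List _), (t.filter q).length ≤ (t.filter p).length :=
      fun t => (List.monotone_filter_right t h).length_le
    rcases List.mem_cons.mp hx with h1 | h1
    · subst h1
      simp only [List.filter_cons, hpx, hqx]
      have := hle t; simp; omega
    · have := ih h1
      by_cases hb : q a = true
      · simp only [List.filter_cons, hb, h a hb]; simpa using Nat.succ_lt_succ this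
      · simp only [List.filter_cons, Bool.not_eq_true] at hb ⊢
        rw [hb]
        by_cases hb2 : p a = true
        · simp only [hb2, if_true, List.length_cons]; simp; omega
        · simp only [Bool.not_eq_true] at hb2; rw [hb2]; simpa using this

lemma pvMemAddImp (v : PySem.Set (Int × Int)) (w : Int × Int) :
    ∀ p : Int × Int, (!(p ∈ PySem.Set.add v w : Bool)) = true → (!(p ∈ v : Bool)) = true := by
  intro p hp
  simp only [Bool.not_eq_eq_eq_not, Bool.not_true, decide_eq_false_iff_not,
    PySem.Set.mem_add] at hp ⊢
  exact fun h => hp (Or.inl h)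

lemma pvFree_add_lt (rows cols : Int) (v : PySem.Set (Int × Int)) (x y : Int)
    (hx0 : 0 ≤ x) (hx : x < rows) (hy0 : 0 ≤ y) (hy : y < cols) (hmem : (x, y) ∉ v) :
    pvFree rows cols (PySem.Set.add v (x, y)) < pvFree rows cols v := by
  unfold pvFree
  have hcell : (x, y) ∈ pvCells rows cols := by
    unfold pvCells
    simp only [List.mem_flatMap, List.mem_map, PySem.List.mem_pyRange_one]
    exact ⟨x, ⟨hx0, hx⟩, y, ⟨hy0, hy⟩, rfl⟩
  exact pvFilter_lt _ _ _ (pvMemAddImp v (x, y)) (x, y) hcell (by simp [hmem])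
    (by simp [PySem.Set.mem_add])

-- ===== PORT A =====
-- A's nested dfs; `fuel` only bounds the recursion depth (any bound > number of grid cells suffices, proved below)
def dfsA (grid : List (List Int)) (rows cols : Int) :
    Nat → PySem.Set (Int × Int) → Int → Int → (PySem.Set (Int × Int)) × Int
  | 0, v, _, _ => (v, 0)
  | fuel + 1, v, r, c =>
    if r < 0 ∨ rows ≤ r ∨ c < 0 ∨ cols ≤ c then (v, 0)
    else if pvCell grid r c = 0 ∨ (r, c) ∈ v then (v, 0)
    else
      let v0 := PySem.Set.add v (r, c)
      let p1 := dfsA grid rows cols fuel v0 (r + 1) c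
      let p2 := dfsA grid rows cols fuel p1.1 (r - 1) c
      let p3 := dfsA grid rows cols fuel p2.1 r (c + 1)
      let p4 := dfsA grid rows cols fuel p3.1 r (c - 1)
      (p4.1, 1 + p1.2 + p2.2 + p3.2 + p4.2)

def count_and_max (grid : List (List Int)) : Int × Int :=
  let rows : Int := grid.length
  let cols : Int := (PySem.List.pyGetD grid 0 []).length  -- grid[0]: raises on empty grid, excluded by Pre_
  let st := (PySem.List.pyRange 0 rows 1).foldl (fun st r =>
    (PySem.List.pyRange 0 cols 1).foldl (fun (st : PySem.Set (Int × Int) × Int × Int) c =>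
      let (visited, count, max_size) := st
      if pvCell grid r c = 1 ∧ (r, c) ∉ visited then
        let p := dfsA grid rows cols ((pvCells rows cols).length + 1) visited r c
        (p.1, count + 1, max max_size p.2)
      else st) st)
    ((PySem.Set.empty : PySem.Set (Int × Int)), (0 : Int), (0 : Int))
  (st.2.1, st.2.2)

-- ===== PORT B =====
-- B's while loop; the Lean list's head is the Python stack's top (the end of the Python list)
def stackRun (grid : List (List Int)) (rows cols : Int) :
    PySem.Set (Int × Int) → List (Int × Int) → Int → (PySem.Set (Int × Int)) × Int
  | v, [], size => (v, size)
  | v, (x, y) :: rest, size =>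
    if x < 0 ∨ rows ≤ x ∨ y < 0 ∨ cols ≤ y then stackRun grid rows cols v rest size
    else if pvCell grid x y = 0 ∨ (x, y) ∈ v then stackRun grid rows cols v rest size
    else stackRun grid rows cols (PySem.Set.add v (x, y))
      ((x + 1, y) :: (x - 1, y) :: (x, y + 1) :: (x, y - 1) :: rest) (size + 1)
  termination_by v stack _ => (pvFree rows cols v, stack.length)
  decreasing_by
  · exact Prod.Lex.right _ (by simp only [List.length_cons]; omega)
  · exact Prod.Lex.right _ (by simp only [List.length_cons]; omega)
  · exact Prod.Lex.left _ _ (pvFree_add_lt rows cols v x y (by omega) (by omega) (by omega) (by omega) (by tauto))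

def count_and_max_alt (grid : List (List Int)) : Int × Int :=
  let rows : Int := grid.length
  let cols : Int := (PySem.List.pyGetD grid 0 []).length  -- grid[0]: raises on empty grid, excluded by Pre_
  let st := (PySem.List.pyRange 0 rows 1).foldl (fun st r =>
    (PySem.List.pyRange 0 cols 1).foldl (fun (st : PySem.Set (Int × Int) × Int × Int) c =>
      let (visited, count, max_size) := st
      if pvCell grid r c = 1 ∧ (r, c) ∉ visited then
        let p := stackRun grid rows cols visited [(r, c)] 0
        (p.1, count + 1, max max_size p.2)
      else st) st)
    ((PySem.Set.empty : PySem.Set (Int × Int)), (0 : Int), (0 : Int))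
  (st.2.1, st.2.2)

-- ===== PRECONDITION & SPEC =====
-- Pre_ excludes exactly the inputs where A raises IndexError: the empty grid (grid[0]) and ragged grids with a
-- row shorter than len(grid[0]) (grid[r][c] in the outer loop); B raises there too
def Pre_count_and_max (grid : List (List Int)) : Prop :=
  grid ≠ [] ∧ ∀ row ∈ grid, (grid.headD []).length ≤ row.length
instance (grid : List (List Int)) : Decidable (Pre_count_and_max grid) := by
  unfold Pre_count_and_max; infer_instance
def pvWitness_count_and_max : List (List Int) := [[1, 0], [0, 1]]

def Spec_count_and_max (grid : List (List Int)) (out : Int × Int) : Prop := out = count_and_max_alt grid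
instance (grid : List (List Int)) (out : Int × Int) : Decidable (Spec_count_and_max grid out) := by
  unfold Spec_count_and_max; infer_instance

-- ===== CLAIM (what is proved, stated in full; the proofs are below) =====
def Claim_equal_count_and_max : Prop := ∀ (grid : List (List Int)), Dom_count_and_max grid →
  Pre_count_and_max grid → Spec_count_and_max grid (count_and_max grid)

-- ===== LEMMAS AND PROOFS =====

-- visiting only shrinks the unvisited count
lemma pvFree_add_le (rows cols : Int) (v : PySem.Set (Int × Int)) (p : Int × Int) :
    pvFree rows cols (PySem.Set.add v p) ≤ pvFree rows cols v :=
  (List.monotone_filter_right _ (pvMemAddImp v p)).length_le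

lemma dfsA_mono (grid : List (List Int)) (rows cols : Int) :
    ∀ (fuel : Nat) (v : PySem.Set (Int × Int)) (r c : Int),
    pvFree rows cols (dfsA grid rows cols fuel v r c).1 ≤ pvFree rows cols v := by
  intro fuel
  induction fuel with
  | zero => intro v r c; simp [dfsA]
  | succ n ih =>
    intro v r c
    simp only [dfsA]
    split_ifs with h1 h2
    · simp
    · simp
    · simp only
      exact le_trans (ih _ _ _) (le_trans (ih _ _ _) (le_trans (ih _ _ _)
        (le_trans (ih _ _ _) (pvFree_add_le rows cols v (r, c)))))

-- the defunctionalization bridge: one stack element behaves like one dfs call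
lemma bridge (grid : List (List Int)) (rows cols : Int) :
    ∀ (fuel : Nat) (v : PySem.Set (Int × Int)) (r c : Int) (rest : List (Int × Int)) (size : Int),
    pvFree rows cols v + 1 ≤ fuel →
    stackRun grid rows cols v ((r, c) :: rest) size
      = stackRun grid rows cols (dfsA grid rows cols fuel v r c).1 rest
          (size + (dfsA grid rows cols fuel v r c).2) := by
  intro fuel
  induction fuel with
  | zero => intro v r c rest size hf; omega
  | succ n ih =>
    intro v r c rest size hf
    rw [stackRun, dfsA]
    split_ifs with h1 h2
    · simp
    · simp
    · push Not at h1
      have hmem : (r, c) ∉ v := fun h => h2 (Or.inr h)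
      have hlt : pvFree rows cols (PySem.Set.add v (r, c)) < pvFree rows cols v :=
        pvFree_add_lt rows cols v r c h1.1 h1.2.1 h1.2.2.1 h1.2.2.2 hmem
      simp only
      set v0 := PySem.Set.add v (r, c) with hv0
      set p1 := dfsA grid rows cols n v0 (r + 1) c with hp1
      set p2 := dfsA grid rows cols n p1.1 (r - 1) c with hp2
      set p3 := dfsA grid rows cols n p2.1 r (c + 1) with hp3
      set p4 := dfsA grid rows cols n p3.1 r (c - 1) with hp4
      have m1 : pvFree rows cols p1.1 ≤ pvFree rows cols v0 := hp1 ▸ dfsA_mono grid rows cols n v0 _ _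
      have m2 : pvFree rows cols p2.1 ≤ pvFree rows cols p1.1 := hp2 ▸ dfsA_mono grid rows cols n p1.1 _ _
      have m3 : pvFree rows cols p3.1 ≤ pvFree rows cols p2.1 := hp3 ▸ dfsA_mono grid rows cols n p2.1 _ _
      rw [ih v0 (r + 1) c _ _ (by omega)]
      rw [ih p1.1 (r - 1) c _ _ (by omega)]
      rw [ih p2.1 r (c + 1) _ _ (by omega)]
      rw [ih p3.1 r (c - 1) _ _ (by omega)]
      congr 1
      ring

lemma inner_eq (grid : List (List Int)) (rows cols : Int) (v : PySem.Set (Int × Int)) (r c : Int) :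
    stackRun grid rows cols v [(r, c)] 0
      = dfsA grid rows cols ((pvCells rows cols).length + 1) v r c := by
  have hfuel : pvFree rows cols v + 1 ≤ (pvCells rows cols).length + 1 := by
    have := List.length_filter_le (fun p => !(p ∈ v : Bool)) (pvCells rows cols)
    unfold pvFree; omega
  rw [bridge grid rows cols _ v r c [] 0 hfuel, stackRun]
  simp

-- ===== VERDICT (by name: the statement is the Claim_ definition above) =====
theorem count_and_max_spec : Claim_equal_count_and_max := by
  intro grid _ _
  unfold Spec_count_and_max count_and_max count_and_max_alt
  simp only
  refine congrArg (fun st : PySem.Set (Int × Int) × Int × Int => (st.2.1, st.2.2)) ?_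
  apply List.foldl_ext
  intro st r _
  apply List.foldl_ext
  intro st' c _
  split_ifs with h
  · rw [inner_eq]
  · rfl
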